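-- pv_equiv track=rewrite | github.com/Kikuzawa/DSTU_VKB | Methods_Programming/laboratories/1/4.py | fill_matrix
-- ===== SOURCE A (Python) =====
-- from typing import List
--
-- def fill_matrix(n: int, m: int) -> List[List[int]]:
--     """
--     Создает и заполняет двумерный массив (матрицу) размером n x m по диагоналям.
--
--     :param n: Количество строк в матрице.
--     :param m: Количество столбцов в матрице.
--     :return: Заполненная матрица.
--     """
--     # Создаем пустую матрицу размером n x m, заполненную нулями
--     matrix: List[List[int]] = [[0 for _ in range(m)] for _ in range(n)]
--     # Счетчик для заполнения матрицы значениями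
--     count: int = 0
--
--     # Перебираем все диагонали матрицы
--     for index_of_diagonal in range(n + m - 1):
--         # Определяем начальную точку для заполнения текущей диагонали
--         start_col: int
--         start_row: int
--
--         if index_of_diagonal < m:
--             # Если диагональ начинается в верхней строке
--             start_col = index_of_diagonal
--             start_row = 0
--         else:
--             # Если диагональ начинается в последнем столбце
--             start_col = m - 1
--             start_row = index_of_diagonal - m + 1
--
--         # Заполняем текущую диагональ
--         while start_col >= 0 and start_row < n:
--             matrix[start_row][start_col] = count
--             count += 1
--             start_col -= 1  # Двигаемся влево по столбцам
--             start_row += 1  # Двигаемся вниз по строкам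
--
--     return matrix
-- ===== SOURCE B (Python) =====
-- from typing import List
--
-- def fill_matrix(n: int, m: int) -> List[List[int]]:
--     """Row-major fill, no diagonal walking and no running counter per cell:
--     one O(n+m) pass tabulates, for each anti-diagonal d, the number of cells
--     on earlier diagonals minus the diagonal's first row, after which every
--     cell (r, c) is simply adj[r + c] + r."""
--     ndiag = n + m - 1
--     adj = []  # adj[d] = (# cells on diagonals < d) - (first row of diagonal d)
--     acc = 0
--     for d in range(ndiag):
--         start = d - m + 1
--         if start < 0:
--             start = 0
--         adj.append(acc - start)
--         acc += min(d + 1, n, m, ndiag - d)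
--     return [[adj[r + c] + r for c in range(m)] for r in range(n)]
-- ===== Notes on version B (the rewrite author's own statement) =====
-- stated objective: alternative
-- what changed: A walks every anti-diagonal with an if/else start point, an inner while-loop and a running counter mutating a preallocated matrix; B makes one O(n+m) pass tabulating per-diagonal prefix counts and first rows, then emits the matrix row-major with each cell computed as adj[r+c] + r.
import Mathlib
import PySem

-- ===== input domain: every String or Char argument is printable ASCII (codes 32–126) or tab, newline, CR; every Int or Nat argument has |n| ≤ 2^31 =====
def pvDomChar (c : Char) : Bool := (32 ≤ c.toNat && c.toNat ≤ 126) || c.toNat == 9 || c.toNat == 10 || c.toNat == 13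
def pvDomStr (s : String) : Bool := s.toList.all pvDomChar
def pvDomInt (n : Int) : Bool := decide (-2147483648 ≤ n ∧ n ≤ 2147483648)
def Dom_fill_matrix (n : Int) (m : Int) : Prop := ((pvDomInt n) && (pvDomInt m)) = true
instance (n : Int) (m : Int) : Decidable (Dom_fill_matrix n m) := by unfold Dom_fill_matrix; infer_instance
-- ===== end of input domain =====

-- B replaces A's diagonal-walking while-loops and running counter by a closed-form
-- per-cell value (triangular-number inclusion-exclusion); equal output on all inputs.


-- ===== PORT A =====
-- matrix[start_row][start_col] = count; at every call site the loop guards give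
-- 0 ≤ start_row < n and 0 ≤ start_col < m, so List.set with .toNat is exact here.
def setCell (mat : List (List Int)) (r : Int) (c : Int) (v : Int) : List (List Int) :=
  mat.set r.toNat ((mat.getD r.toNat []).set c.toNat v)

-- the inner 'while start_col >= 0 and start_row < n' loop; returns (matrix, count)
def fillDiag (n : Int) (mat : List (List Int)) (count : Int) (row : Int) (col : Int) :
    List (List Int) × Int :=
  if h : 0 ≤ col ∧ row < n then
    fillDiag n (setCell mat row col count) (count + 1) (row + 1) (col - 1)
  else (mat, count)
termination_by (col + 1).toNat
decreasing_by omega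

-- the body of 'for index_of_diagonal in range(n + m - 1)'
def diagStep (n : Int) (m : Int) (st : List (List Int) × Int) (index_of_diagonal : Int) :
    List (List Int) × Int :=
  let start_col : Int := if index_of_diagonal < m then index_of_diagonal else m - 1
  let start_row : Int := if index_of_diagonal < m then 0 else index_of_diagonal - m + 1
  fillDiag n st.1 st.2 start_row start_col

def fill_matrix (n : Int) (m : Int) : List (List Int) :=
  let matrix : List (List Int) :=
    (PySem.List.pyRange 0 n 1).map (fun _ => (PySem.List.pyRange 0 m 1).map (fun _ => (0 : Int)))
  ((PySem.List.pyRange 0 (n + m - 1) 1).foldl (diagStep n m) (matrix, 0)).1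

-- ===== PORT B =====
-- the body of B's 'for d in range(ndiag)' loop; state = (adj, acc)
def adjStep (n : Int) (m : Int) (st : List Int × Int) (d : Int) : List Int × Int :=
  let start : Int := if d - m + 1 < 0 then 0 else d - m + 1
  (st.1 ++ [st.2 - start], st.2 + min (min (min (d + 1) n) m) (n + m - 1 - d))

def fill_matrix_alt (n : Int) (m : Int) : List (List Int) :=
  let adj : List Int :=
    ((PySem.List.pyRange 0 (n + m - 1) 1).foldl (adjStep n m) ([], 0)).1
  -- adj[r + c]: the index is always in range here, so pyGetD is exact
  (PySem.List.pyRange 0 n 1).map (fun r =>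
    (PySem.List.pyRange 0 m 1).map (fun c =>
      PySem.List.pyGetD adj (r + c) 0 + r))

-- ===== PRECONDITION & SPEC =====
def Spec_fill_matrix (n : Int) (m : Int) (out : List (List Int)) : Prop := out = fill_matrix_alt n m
instance (n : Int) (m : Int) (out : List (List Int)) : Decidable (Spec_fill_matrix n m out) := by unfold Spec_fill_matrix; infer_instance

-- ===== CLAIM (what is proved, stated in full; the proofs are below) =====
def Claim_equal_fill_matrix : Prop := ∀ (n : Int) (m : Int), Dom_fill_matrix n m → Spec_fill_matrix n m (fill_matrix n m)

-- ===== LEMMAS AND PROOFS =====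

-- closed form for B's running count 'acc' at diagonal d (triangular inclusion-exclusion)
def triB (x : Int) : Int := if 0 < x then PySem.Int.floordiv (x * (x + 1)) 2 else 0

def beforeB (n : Int) (m : Int) (d : Int) : Int :=
  triB d - triB (d - n) - triB (d - m) + triB (d - n - m)

-- the value B assigns to cell (r, c)
def cellVal (n : Int) (m : Int) (r : Int) (c : Int) : Int :=
  beforeB n m (r + c) - max 0 (r + c - m + 1) + r

-- the matrix after all diagonals < d are filled and, on diagonal d, all rows < rr
def pmat (n : Int) (m : Int) (d : Int) (rr : Int) : List (List Int) :=
  (PySem.List.pyRange 0 n 1).map (fun r =>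
    (PySem.List.pyRange 0 m 1).map (fun c =>
      if r + c < d ∨ (r + c = d ∧ r < rr) then cellVal n m r c else 0))

lemma triB_nonpos {x : Int} (h : x ≤ 0) : triB x = 0 := by
  unfold triB; rw [if_neg (by omega)]

lemma triB_succ (x : Int) : triB (x + 1) = triB x + max 0 (x + 1) := by
  unfold triB
  split_ifs with h1 h2
  · rw [PySem.Int.floordiv_eq_ediv_of_pos (by norm_num),
      PySem.Int.floordiv_eq_ediv_of_pos (by norm_num)]
    have hx : (x + 1) * (x + 1 + 1) = x * (x + 1) + (x + 1) * 2 := by ring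
    rw [hx, Int.add_mul_ediv_right _ _ (by norm_num),
      max_eq_right (by omega : (0:Int) ≤ x + 1)]
  · have hx : x = 0 := by omega
    subst hx; decide
  · omega
  · omega

lemma beforeB_zero (n m : Int) (hn : 1 ≤ n) (hm : 1 ≤ m) : beforeB n m 0 = 0 := by
  unfold beforeB
  rw [triB_nonpos (by omega : (0:Int) ≤ 0), triB_nonpos (by omega : 0 - n ≤ 0),
    triB_nonpos (by omega : 0 - m ≤ 0), triB_nonpos (by omega : 0 - n - m ≤ 0)]
  ring

-- the count step: crossing from diagonal d to d+1 adds exactly the length of diagonal d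
lemma beforeB_succ_len (n m d : Int) (hn : 1 ≤ n) (hm : 1 ≤ m)
    (hd0 : 0 ≤ d) (hd1 : d ≤ n + m - 2) :
    beforeB n m (d + 1) = beforeB n m d + (min d (n - 1) + 1 - max 0 (d - m + 1)) := by
  unfold beforeB
  rw [show d + 1 - n - m = (d - n - m) + 1 by ring,
      show d + 1 - n = (d - n) + 1 by ring,
      show d + 1 - m = (d - m) + 1 by ring,
      triB_succ, triB_succ, triB_succ, triB_succ]
  generalize triB d = a
  generalize triB (d - n) = b
  generalize triB (d - m) = c
  generalize triB (d - n - m) = e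
  omega

lemma pmat_congr (n m d1 r1 d2 r2 : Int)
    (h : ∀ i j : Int, 0 ≤ i → i < n → 0 ≤ j → j < m →
      ((i + j < d1 ∨ (i + j = d1 ∧ i < r1)) ↔ (i + j < d2 ∨ (i + j = d2 ∧ i < r2)))) :
    pmat n m d1 r1 = pmat n m d2 r2 := by
  unfold pmat
  apply List.map_congr_left
  intro r hr
  rw [PySem.List.mem_pyRange_one] at hr
  apply List.map_congr_left
  intro c hc
  rw [PySem.List.mem_pyRange_one] at hc
  exact if_congr (h r c hr.1 hr.2 hc.1 hc.2) rfl rfl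

lemma pmat_zero (n m : Int) :
    pmat n m 0 0 =
      (PySem.List.pyRange 0 n 1).map (fun _ => (PySem.List.pyRange 0 m 1).map (fun _ => (0 : Int))) := by
  unfold pmat
  apply List.map_congr_left
  intro r hr
  rw [PySem.List.mem_pyRange_one] at hr
  apply List.map_congr_left
  intro c hc
  rw [PySem.List.mem_pyRange_one] at hc
  rw [if_neg (by omega)]

-- B's tabulation loop: adj lists exactly (beforeB d - first row of diagonal d)
lemma adj_run (n m : Int) (hn : 1 ≤ n) (hm : 1 ≤ m) :
    ∀ (k : Nat), (k : Int) ≤ n + m - 1 →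
    (PySem.List.pyRange 0 (k : Int) 1).foldl (adjStep n m) ([], 0)
      = ((PySem.List.pyRange 0 (k : Int) 1).map
          (fun d => beforeB n m d - max 0 (d - m + 1)), beforeB n m (k : Int)) := by
  intro k
  induction k with
  | zero =>
    intro _
    rw [show ((0 : Nat) : Int) = 0 by norm_num, PySem.List.pyRange_one_eq_nil (le_refl 0)]
    rw [List.foldl_nil, List.map_nil, beforeB_zero n m hn hm]
  | succ k ih =>
    intro hk
    have hcast : ((k + 1 : Nat) : Int) = (k : Int) + 1 := by push_cast; ring
    have hk' : ((k : Nat) : Int) ≤ n + m - 1 := by omega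
    rw [hcast, PySem.List.pyRange_one_succ_right (by positivity), List.foldl_append,
      List.foldl_cons, List.foldl_nil, ih hk', List.map_append, List.map_cons, List.map_nil]
    unfold adjStep
    dsimp only
    set d := (k : Int) with hd
    have hd0 : (0:Int) ≤ d := by positivity
    have hd1 : d ≤ n + m - 2 := by omega
    rw [show (if d - m + 1 < 0 then (0:Int) else d - m + 1) = max 0 (d - m + 1) by
        split_ifs <;> omega,
      beforeB_succ_len n m d hn hm hd0 hd1,
      show beforeB n m d + min (min (min (d + 1) n) m) (n + m - 1 - d)
          = beforeB n m d + (min d (n - 1) + 1 - max 0 (d - m + 1)) by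
        have : min (min (min (d + 1) n) m) (n + m - 1 - d)
            = min d (n - 1) + 1 - max 0 (d - m + 1) := by omega
        rw [this]]

lemma pmat_full (n m x : Int) (hn : 1 ≤ n) (hm : 1 ≤ m) :
    pmat n m (n + m - 1) x = fill_matrix_alt n m := by
  unfold pmat fill_matrix_alt
  dsimp only
  have hK : (((n + m - 1).toNat : Nat) : Int) = n + m - 1 := by omega
  rw [← hK, adj_run n m hn hm _ (by omega)]
  apply List.map_congr_left
  intro r hr
  rw [PySem.List.mem_pyRange_one] at hr
  apply List.map_congr_left
  intro c hc
  rw [PySem.List.mem_pyRange_one] at hc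
  rw [if_pos (by omega : r + c < ((n + m - 1).toNat : Int) ∨ (r + c = ((n + m - 1).toNat : Int) ∧ r < x))]
  have hrc : r + c = (((r + c).toNat : Nat) : Int) := by omega
  rw [hrc, PySem.List.pyGetD_map_pyRange _ _ _ _ (by omega), ← hrc]
  unfold cellVal
  ring

-- one matrix write of A = one cell of B's closed form
lemma setCell_pmat (n m d r : Int) (hr0 : 0 ≤ r) (hrn : r < n)
    (hc0 : 0 ≤ d - r) (hcm : d - r < m) :
    setCell (pmat n m d r) r (d - r) (cellVal n m r (d - r)) = pmat n m d (r + 1) := by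
  unfold setCell pmat
  apply List.ext_getElem
  · simp
  · intro i h1 h2
    rw [List.getElem_set]
    by_cases hi : r.toNat = i
    · subst hi
      rw [if_pos rfl]
      rw [List.getD_eq_getElem _ _ (by simp; omega)]
      simp only [List.getElem_map, PySem.List.getElem_pyRange_one]
      have hri : (0 : Int) + ↑r.toNat = r := by omega
      rw [hri]
      apply List.ext_getElem
      · simp
      · intro j j1 j2
        rw [List.getElem_set]
        simp only [List.getElem_map, PySem.List.getElem_pyRange_one]
        have hjm : (j : Int) < m := by
          have := j2; simp at this; omega
        by_cases hj : (d - r).toNat = j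
        · subst hj
          rw [if_pos rfl]
          have hjj : (0 : Int) + ↑(d - r).toNat = d - r := by omega
          rw [hjj, if_pos (by omega : r + (d - r) < d ∨ (r + (d - r) = d ∧ r < r + 1))]
        · rw [if_neg hj]
          have hne : (0 : Int) + ↑j ≠ d - r := by omega
          exact if_congr (by omega) rfl rfl
    · rw [if_neg hi]
      simp only [List.getElem_map, PySem.List.getElem_pyRange_one]
      have hin : (i : Int) < n := by
        have := h2; simp at this; omega
      have hir : (0 : Int) + ↑i ≠ r := by omega
      apply List.map_congr_left
      intro c hc
      rw [PySem.List.mem_pyRange_one] at hc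
      exact if_congr (by omega) rfl rfl

lemma fillDiag_stuck (n : Int) (mat : List (List Int)) (c row col : Int)
    (h : ¬ (0 ≤ col ∧ row < n)) : fillDiag n mat c row col = (mat, c) := by
  rw [fillDiag, dif_neg h]

-- the inner while loop, from row r down to the end of diagonal d
lemma fillDiag_run (n m d : Int) (hn : 1 ≤ n) (hm : 1 ≤ m) (hd0 : 0 ≤ d) :
    ∀ (k : Nat) (r : Int), max 0 (d - m + 1) ≤ r → r + k = min d (n - 1) + 1 →
    fillDiag n (pmat n m d r) (beforeB n m d + (r - max 0 (d - m + 1))) r (d - r)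
      = (pmat n m d (min d (n - 1) + 1),
         beforeB n m d + (min d (n - 1) + 1 - max 0 (d - m + 1))) := by
  intro k
  induction k with
  | zero =>
    intro r hr hrk
    have hre : r = min d (n - 1) + 1 := by omega
    rw [fillDiag, dif_neg (by omega), hre]
  | succ k ih =>
    intro r hr hrk
    rw [fillDiag, dif_pos (by omega : 0 ≤ d - r ∧ r < n)]
    have hcnt : beforeB n m d + (r - max 0 (d - m + 1)) = cellVal n m r (d - r) := by
      unfold cellVal
      rw [show r + (d - r) = d by ring]
      ring
    rw [hcnt, setCell_pmat n m d r (by omega) (by omega) (by omega) (by omega)]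
    have hcnt2 : cellVal n m r (d - r) + 1 = beforeB n m d + (r + 1 - max 0 (d - m + 1)) := by
      rw [← hcnt]; ring
    rw [hcnt2, show d - r - 1 = d - (r + 1) by ring]
    exact ih (r + 1) (by omega) (by omega)

-- the inner loop started at the head of diagonal d
lemma fillDiag_run0 (n m d : Int) (hn : 1 ≤ n) (hm : 1 ≤ m)
    (hd0 : 0 ≤ d) (hd1 : d ≤ n + m - 2) :
    fillDiag n (pmat n m d (max 0 (d - m + 1))) (beforeB n m d)
        (max 0 (d - m + 1)) (d - max 0 (d - m + 1))
      = (pmat n m (d + 1) (max 0 (d + 1 - m + 1)), beforeB n m (d + 1)) := by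
  have h := fillDiag_run n m d hn hm hd0
    ((min d (n - 1) + 1 - max 0 (d - m + 1)).toNat) (max 0 (d - m + 1))
    (le_refl _) (by omega)
  rw [sub_self, add_zero] at h
  rw [h, beforeB_succ_len n m d hn hm hd0 hd1,
    pmat_congr n m d (min d (n - 1) + 1) (d + 1) (max 0 (d + 1 - m + 1))
      (by intro i j hi1 hi2 hj1 hj2; omega)]

lemma foldl_fixed {α β : Type} (f : β → α → β) (l : List α) (init : β)
    (h : ∀ st a, a ∈ l → f st a = st) : l.foldl f init = init := by
  induction l generalizing init with
  | nil => rfl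
  | cons x xs ih =>
    rw [List.foldl_cons, h init x (by simp)]
    exact ih init (fun st a ha => h st a (by simp [ha]))

-- the outer for loop over the first k diagonals
lemma outer_run (n m : Int) (hn : 1 ≤ n) (hm : 1 ≤ m) :
    ∀ (k : Nat), (k : Int) ≤ n + m - 1 →
    (PySem.List.pyRange 0 (k : Int) 1).foldl (diagStep n m) (pmat n m 0 0, 0)
      = (pmat n m (k : Int) (max 0 ((k : Int) - m + 1)), beforeB n m (k : Int)) := by
  intro k
  induction k with
  | zero =>
    intro _
    rw [show ((0 : Nat) : Int) = 0 by norm_num, PySem.List.pyRange_one_eq_nil (le_refl 0)]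
    rw [List.foldl_nil, beforeB_zero n m hn hm,
      show max 0 ((0:Int) - m + 1) = 0 by omega]
  | succ k ih =>
    intro hk
    have hcast : ((k + 1 : Nat) : Int) = (k : Int) + 1 := by push_cast; ring
    have hk' : ((k : Nat) : Int) ≤ n + m - 1 := by omega
    rw [hcast, PySem.List.pyRange_one_succ_right (by positivity), List.foldl_append,
      List.foldl_cons, List.foldl_nil, ih hk']
    unfold diagStep
    dsimp only
    set d := (k : Int) with hd
    have hd0 : (0:Int) ≤ d := by positivity
    have hd1 : d ≤ n + m - 2 := by omega
    by_cases hdm : d < m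
    · rw [if_pos hdm, if_pos hdm, show max 0 (d - m + 1) = 0 by omega]
      have h := fillDiag_run0 n m d hn hm hd0 hd1
      rw [show max 0 (d - m + 1) = 0 by omega, sub_zero] at h
      exact h
    · rw [if_neg hdm, if_neg hdm, show max 0 (d - m + 1) = d - m + 1 by omega]
      have h := fillDiag_run0 n m d hn hm hd0 hd1
      rw [show max 0 (d - m + 1) = d - m + 1 by omega,
        show d - (d - m + 1) = m - 1 by ring] at h
      exact h

-- ===== VERDICT (by name: the statement is the Claim_ definition above) =====
theorem fill_matrix_spec : Claim_equal_fill_matrix := by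
  unfold Claim_equal_fill_matrix Spec_fill_matrix
  intro n m _
  by_cases hn : n ≤ 0
  · -- no rows: A's guard 'start_row < n' never holds, both sides are []
    unfold fill_matrix fill_matrix_alt
    rw [PySem.List.pyRange_one_eq_nil hn, List.map_nil, List.map_nil]
    dsimp only
    rw [foldl_fixed _ _ _ ?_]
    intro st a ha
    rw [PySem.List.mem_pyRange_one] at ha
    unfold diagStep
    dsimp only
    by_cases ham : a < m
    · rw [if_pos ham, if_pos ham, fillDiag_stuck n _ _ _ _ (by omega)]
    · rw [if_neg ham, if_neg ham, fillDiag_stuck n _ _ _ _ (by omega)]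
  · by_cases hm : m ≤ 0
    · -- no columns: the start column m-1 is negative, rows stay empty on both sides
      unfold fill_matrix fill_matrix_alt
      rw [PySem.List.pyRange_one_eq_nil hm]
      simp only [List.map_nil]
      rw [foldl_fixed _ _ _ ?_]
      intro st a ha
      rw [PySem.List.mem_pyRange_one] at ha
      unfold diagStep
      dsimp only
      rw [if_neg (by omega), if_neg (by omega), fillDiag_stuck n _ _ _ _ (by omega)]
    · -- main case: 1 ≤ n, 1 ≤ m
      have hn1 : 1 ≤ n := by omega
      have hm1 : 1 ≤ m := by omega
      unfold fill_matrix
      dsimp only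
      rw [← pmat_zero n m]
      have hK : (((n + m - 1).toNat : Nat) : Int) = n + m - 1 := by omega
      rw [← hK, outer_run n m hn1 hm1 (n + m - 1).toNat (by omega), hK,
        pmat_full n m _ hn1 hm1]
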